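-- pv_equiv track=rewrite | github.com/ishapira1/LLMsKnow | src/llmssycoph/saving_manager.py | _format_mc_option_count_display
-- ===== SOURCE A (Python) =====
-- from typing import Any, Dict, List, Optional, Sequence, Set
--
-- def _format_mc_option_count_display(option_counts: Sequence[int]) -> Optional[str]:
--     normalized_counts = sorted({int(count) for count in option_counts if int(count) > 0})
--     if not normalized_counts:
--         return None
--     if len(normalized_counts) == 1:
--         return str(normalized_counts[0])
--
--     contiguous_counts = list(range(normalized_counts[0], normalized_counts[-1] + 1))
--     if normalized_counts == contiguous_counts:
--         count_text = f"{normalized_counts[0]}-{normalized_counts[-1]}"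
--     else:
--         count_text = "/".join(str(count) for count in normalized_counts)
--     return f"{count_text} (varies by question)"
-- ===== SOURCE B (Python) =====
-- def _format_mc_option_count_display(option_counts):
--     values = sorted({int(c) for c in option_counts if int(c) > 0})
--     runs = []
--     for v in values:
--         if runs and v == runs[-1][1] + 1:
--             runs[-1] = (runs[-1][0], v)
--         else:
--             runs.append((v, v))
--     if not runs:
--         return None
--     if len(runs) == 1:
--         lo, hi = runs[0]
--         if lo == hi:
--             return str(lo)
--         return f"{lo}-{hi} (varies by question)"
--     return "/".join(str(v) for v in values) + " (varies by question)"
-- ===== Notes on version B (the rewrite author's own statement) =====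
-- stated objective: alternative
-- what changed: B scans the sorted distinct positive counts once, grouping them into maximal consecutive runs, and formats from the run list (one run collapsed to a point -> single number, one wider run -> 'lo-hi', several runs -> slash-join), instead of A's materializing list(range(first,last+1)) and comparing it wholesale against the list.
import Mathlib
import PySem

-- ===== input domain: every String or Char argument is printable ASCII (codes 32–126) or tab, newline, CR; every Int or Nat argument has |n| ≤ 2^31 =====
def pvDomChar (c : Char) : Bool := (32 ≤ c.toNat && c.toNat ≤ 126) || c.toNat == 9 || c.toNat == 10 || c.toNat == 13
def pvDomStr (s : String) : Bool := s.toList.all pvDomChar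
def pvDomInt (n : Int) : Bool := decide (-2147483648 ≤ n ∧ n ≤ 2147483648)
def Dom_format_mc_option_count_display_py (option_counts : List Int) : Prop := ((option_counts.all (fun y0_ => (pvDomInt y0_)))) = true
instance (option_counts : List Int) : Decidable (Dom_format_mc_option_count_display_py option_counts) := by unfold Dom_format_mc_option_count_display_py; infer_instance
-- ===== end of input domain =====

-- B replaces A's sort + list(range(first,last+1)) list comparison by a single pass that
-- groups the sorted distinct counts into maximal consecutive runs and formats from the
-- run list (objective: alternative).


-- ===== PORT A =====
def format_mc_option_count_display_py (option_counts : List Int) : Option String :=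
  let normalized :=
    PySem.List.sorted (PySem.Set.ofList (option_counts.filter (fun count => decide (0 < count))))
      (fun x => x) false
  if normalized = [] then none
  else if normalized.length = 1 then
    some (PySem.Int.toStr (PySem.List.pyGetD normalized 0 0))
  else
    let first := PySem.List.pyGetD normalized 0 0
    let last := PySem.List.pyGetD normalized (-1) 0
    let contiguous := PySem.List.pyRange first (last + 1) 1
    let count_text :=
      if normalized = contiguous then
        PySem.Str.join "" [PySem.Int.toStr first, "-", PySem.Int.toStr last]
      else
        PySem.Str.join "/" (normalized.map PySem.Int.toStr)
    some (PySem.Str.join "" [count_text, " (varies by question)"])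

-- ===== PORT B =====
-- one step of B's loop: extend the last run when v is its successor, else open a new run
def pvStep (runs : List (Int × Int)) (v : Int) : List (Int × Int) :=
  match runs.getLast? with
  | some (lo, hi) => if v = hi + 1 then runs.dropLast ++ [(lo, v)] else runs ++ [(v, v)]
  | none => runs ++ [(v, v)]

def format_mc_option_count_display_py_alt (option_counts : List Int) : Option String :=
  let values :=
    PySem.List.sorted (PySem.Set.ofList (option_counts.filter (fun c => decide (0 < c))))
      (fun x => x) false
  let runs := values.foldl pvStep []
  match runs with
  | [] => none
  | [(lo, hi)] =>
      if lo = hi then some (PySem.Int.toStr lo)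
      else some (PySem.Str.join "" [PySem.Int.toStr lo, "-", PySem.Int.toStr hi, " (varies by question)"])
  | _ => some (PySem.Str.join "" [PySem.Str.join "/" (values.map PySem.Int.toStr), " (varies by question)"])

-- ===== PRECONDITION & SPEC =====
def Spec_format_mc_option_count_display_py (option_counts : List Int) (out : Option String) : Prop := out = format_mc_option_count_display_py_alt option_counts
instance (option_counts : List Int) (out : Option String) : Decidable (Spec_format_mc_option_count_display_py option_counts out) := by unfold Spec_format_mc_option_count_display_py; infer_instance

-- ===== CLAIM (what is proved, stated in full; the proofs are below) =====
def Claim_equal_format_mc_option_count_display_py : Prop := ∀ (option_counts : List Int), Dom_format_mc_option_count_display_py option_counts → Spec_format_mc_option_count_display_py option_counts (format_mc_option_count_display_py option_counts)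

-- ===== LEMMAS AND PROOFS =====

-- pvStep never shrinks the run list, hence neither does folding it
theorem pv_len_mono : ∀ (t : List Int) (s : List (Int × Int)), s.length ≤ (t.foldl pvStep s).length := by
  intro t
  induction t with
  | nil => intro s; simp
  | cons v t ih =>
    intro s
    refine le_trans ?_ (ih (pvStep s v))
    unfold pvStep
    cases hl : s.getLast? with
    | none => simp
    | some p =>
      obtain ⟨lo, hi⟩ := p
      by_cases hv : v = hi + 1
      · have hne : s ≠ [] := by
          intro h; rw [h] at hl; simp at hl
        simp [hv, List.length_dropLast, Nat.sub_add_cancel (List.length_pos_of_ne_nil hne)]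
      · simp [hv]

-- folding a consecutive chain only extends the last run
theorem pv_chain_run : ∀ (t : List Int) (acc : List (Int × Int)) (lo h : Int),
    List.IsChain (fun a b => b = a + 1) (h :: t) →
    t.foldl pvStep (acc ++ [(lo, h)]) = acc ++ [(lo, h + (t.length : Int))] := by
  intro t
  induction t with
  | nil => intro acc lo h _; simp
  | cons v t ih =>
    intro acc lo h hc
    rcases List.isChain_cons_cons.mp hc with ⟨hv, hc'⟩
    have hstep : pvStep (acc ++ [(lo, h)]) v = acc ++ [(lo, v)] := by
      unfold pvStep
      rw [List.getLast?_concat]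
      simp [hv]
    rw [List.foldl_cons, hstep, ih acc lo v hc']
    have hval : v + (t.length : Int) = h + (((t.length : Nat) + 1 : Nat) : Int) := by
      push_cast; omega
    simp [hval]

-- a break in the chain forces at least a second run
theorem pv_nonchain_run : ∀ (t : List Int) (acc : List (Int × Int)) (lo h : Int),
    ¬ List.IsChain (fun a b => b = a + 1) (h :: t) →
    acc.length + 2 ≤ (t.foldl pvStep (acc ++ [(lo, h)])).length := by
  intro t
  induction t with
  | nil => intro acc lo h hc; exact absurd (List.isChain_singleton h) hc
  | cons v t ih =>
    intro acc lo h hc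
    rw [List.foldl_cons]
    by_cases hv : v = h + 1
    · have hstep : pvStep (acc ++ [(lo, h)]) v = acc ++ [(lo, v)] := by
        unfold pvStep
        rw [List.getLast?_concat]
        simp [hv]
      have hc' : ¬ List.IsChain (fun a b => b = a + 1) (v :: t) := by
        intro h'; exact hc (List.isChain_cons_cons.mpr ⟨hv, h'⟩)
      rw [hstep]; exact ih acc lo v hc'
    · have hstep : pvStep (acc ++ [(lo, h)]) v = (acc ++ [(lo, h)]) ++ [(v, v)] := by
        unfold pvStep
        rw [List.getLast?_concat]
        simp [hv]
      rw [hstep]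
      have hm := pv_len_mono t ((acc ++ [(lo, h)]) ++ [(v, v)])
      simp at hm ⊢
      omega

-- a consecutive chain is exactly the Python range from its head
theorem pv_chain_range : ∀ (t : List Int) (h : Int),
    List.IsChain (fun a b => b = a + 1) (h :: t) →
    h :: t = PySem.List.pyRange h (h + (t.length : Int) + 1) 1 := by
  intro t
  induction t with
  | nil => intro h _; simp [PySem.List.pyRange_one_singleton]
  | cons v t ih =>
    intro h hc
    rcases List.isChain_cons_cons.mp hc with ⟨hv, hc'⟩
    have hlt : h < h + ((t.length + 1 : Nat) : Int) + 1 := by push_cast; omega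
    simp only [List.length_cons]
    rw [PySem.List.pyRange_one_cons hlt]
    have hval : h + ((t.length + 1 : Nat) : Int) + 1 = v + (t.length : Int) + 1 := by
      push_cast; omega
    rw [hval, ← hv, ← ih v hc']

-- every Python range with step 1 is a consecutive chain
theorem pv_range_chain (a b : Int) : List.IsChain (fun x y => y = x + 1) (PySem.List.pyRange a b 1) := by
  by_cases hab : b ≤ a
  · rw [PySem.List.pyRange_one_eq_nil hab]; exact List.isChain_nil
  · push Not at hab
    have hn : (b - a).toNat ≠ 0 := by omega
    generalize hgen : (b - a).toNat = n at hn
    induction n generalizing a with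
    | zero => exact absurd rfl hn
    | succ n ihn =>
      rw [PySem.List.pyRange_one_cons hab]
      by_cases hab' : b ≤ a + 1
      · rw [PySem.List.pyRange_one_eq_nil hab']; exact List.isChain_singleton a
      · push Not at hab'
        rw [PySem.List.pyRange_one_cons hab']
        exact List.isChain_cons_cons.mpr ⟨rfl, by
          rw [← PySem.List.pyRange_one_cons hab']
          exact ihn (a + 1) hab' (by omega) (by omega)⟩

-- the last element of a consecutive chain
theorem pv_chain_getLast : ∀ (t : List Int) (h : Int),
    List.IsChain (fun a b => b = a + 1) (h :: t) →
    (h :: t).getLast (List.cons_ne_nil h t) = h + (t.length : Int) := by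
  intro t
  induction t with
  | nil => intro h _; simp
  | cons v t ih =>
    intro h hc
    rcases List.isChain_cons_cons.mp hc with ⟨hv, hc'⟩
    rw [List.getLast_cons (List.cons_ne_nil v t), ih v hc', hv]
    simp only [List.length_cons]; push_cast; omega

-- flattening A's nested empty-separator join into B's flat one
theorem pv_join_flat (a c : String) :
    PySem.Str.join "" [PySem.Str.join "" [a, "-", c], " (varies by question)"] =
      PySem.Str.join "" [a, "-", c, " (varies by question)"] := by
  simp [PySem.Str.join, PySem.Chars.join, List.intercalate]

-- ===== VERDICT (by name: the statement is the Claim_ definition above) =====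
theorem format_mc_option_count_display_py_spec : Claim_equal_format_mc_option_count_display_py := by
  intro xs _
  unfold Spec_format_mc_option_count_display_py
  unfold format_mc_option_count_display_py format_mc_option_count_display_py_alt
  simp only []
  generalize PySem.List.sorted (PySem.Set.ofList (xs.filter (fun c => decide (0 < c)))) (fun x => x) false = L
  cases L with
  | nil => simp
  | cons h t =>
    rw [if_neg (List.cons_ne_nil h t)]
    have hfold0 : (h :: t).foldl pvStep [] = t.foldl pvStep ([] ++ [(h, h)]) := by
      rw [List.foldl_cons]; rfl
    by_cases hch : List.IsChain (fun a b => b = a + 1) (h :: t)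
    · have hruns : (h :: t).foldl pvStep [] = [(h, h + (t.length : Int))] := by
        rw [hfold0, pv_chain_run t [] h h hch]; rfl
      rw [hruns]
      cases t with
      | nil =>
        simp [PySem.List.pyGetD]
      | cons v t' =>
        rw [if_neg (by simp : ¬ ((h :: v :: t' : List Int)).length = 1)]
        have hfirst : PySem.List.pyGetD (h :: v :: t') 0 0 = h := by
          simp [PySem.List.pyGetD_zero_cons]
        have hlast : PySem.List.pyGetD (h :: v :: t') (-1) 0 = h + ((v :: t').length : Int) := by
          rw [PySem.List.pyGetD_neg_one _ 0 (List.cons_ne_nil _ _)]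
          exact pv_chain_getLast (v :: t') h hch
        rw [hfirst, hlast, if_pos (pv_chain_range (v :: t') h hch)]
        have hne : ¬ (h : Int) = h + (((v :: t').length : Nat) : Int) := by
          simp only [List.length_cons]; push_cast; omega
        simp only [if_neg hne, pv_join_flat]
    · have hlen2 : 2 ≤ ((h :: t).foldl pvStep []).length := by
        rw [hfold0]
        simpa using pv_nonchain_run t [] h h hch
      have hlen1 : ¬ (h :: t).length = 1 := by
        intro hl
        have ht : t = [] := by
          cases t with
          | nil => rfl
          | cons a b => simp at hl
        exact hch (ht ▸ List.isChain_singleton h)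
      rw [if_neg hlen1]
      have hcontig : ¬ (h :: t) = PySem.List.pyRange (PySem.List.pyGetD (h :: t) 0 0) (PySem.List.pyGetD (h :: t) (-1) 0 + 1) 1 := by
        intro heq
        exact hch (heq ▸ pv_range_chain _ _)
      rw [if_neg hcontig]
      cases hr : (h :: t).foldl pvStep [] with
      | nil => rw [hr] at hlen2; simp at hlen2
      | cons r1 rs =>
        cases hrs : rs with
        | nil => rw [hr, hrs] at hlen2; simp at hlen2
        | cons r2 rs' => rfl
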